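-- pv_equiv track=rewrite | github.com/mitchfriedman/Seam-Carving | seamcarver/seam_carving.py | get_shortest_vertical_path
-- ===== SOURCE A (Python) =====
-- def get_shortest_vertical_path(graph):
--     shortest = -1
--     position = -1
--     for i in range(len(graph[0])):
--         column_sum = 0
--         for j in range(len(graph)):
--             column_sum += graph[j][i]
--
--         if position < 0 or column_sum <= shortest:
--             shortest = column_sum
--             position = i
--
--     return position
-- ===== SOURCE B (Python) =====
-- def get_shortest_vertical_path(graph):
--     # accumulate all column sums in a single row-major sweep
--     sums = [0] * len(graph[0])
--     for row in graph:
--         sums = [s + row[i] for i, s in enumerate(sums)]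
--     # rightmost argmin: scan right-to-left, keep first strict improvement
--     best = None
--     pos = -1
--     for i, s in reversed(list(enumerate(sums))):
--         if best is None or s < best:
--             best, pos = s, i
--     return pos
-- ===== Notes on version B (the rewrite author's own statement) =====
-- stated objective: alternative
-- what changed: Replaces A's column-major nested loops with fused running-best state by a row-major single sweep that accumulates all column sums elementwise at once, followed by a right-to-left reversed-enumerate scan whose strict '<' improvement rule yields A's later-column tie-break without any <=/position<0 bookkeeping.
import Mathlib
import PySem

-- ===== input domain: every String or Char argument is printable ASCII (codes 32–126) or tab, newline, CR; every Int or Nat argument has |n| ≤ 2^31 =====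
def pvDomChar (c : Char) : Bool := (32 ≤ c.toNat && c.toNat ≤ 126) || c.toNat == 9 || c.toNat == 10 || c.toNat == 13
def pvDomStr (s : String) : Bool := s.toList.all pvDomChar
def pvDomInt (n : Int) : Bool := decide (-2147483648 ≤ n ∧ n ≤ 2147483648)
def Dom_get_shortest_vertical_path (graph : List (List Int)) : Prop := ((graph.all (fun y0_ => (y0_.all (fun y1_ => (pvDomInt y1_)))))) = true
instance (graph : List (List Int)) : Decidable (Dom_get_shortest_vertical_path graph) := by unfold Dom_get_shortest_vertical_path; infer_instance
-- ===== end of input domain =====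

-- One line: B accumulates all column sums in one row-major sweep, then finds the rightmost argmin by a reversed strict-< scan; objective: alternative (different traversal and tie-break mechanism, same cost).

-- ===== PORT A =====
def get_shortest_vertical_path (graph : List (List Int)) : Int :=
  -- graph[0] / graph[j][i] raise IndexError outside Pre_; pyGetD defaults never fire inside Pre_
  ((PySem.List.pyRange 0 ((PySem.List.pyGetD graph 0 []).length : Int) 1).foldl
    (fun (st : Int × Int) i =>
      let column_sum :=
        (PySem.List.pyRange 0 (graph.length : Int) 1).foldl
          (fun s j => s + PySem.List.pyGetD (PySem.List.pyGetD graph j []) i 0) 0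
      if st.2 < 0 ∨ column_sum ≤ st.1 then (column_sum, i) else st)
    (-1, -1)).2

-- ===== PORT B =====
def get_shortest_vertical_path_alt (graph : List (List Int)) : Int :=
  let sums0 : List Int := List.replicate (PySem.List.pyGetD graph 0 []).length 0   -- [0] * len(graph[0])
  let sums := graph.foldl
    (fun acc row => (PySem.List.enumerate acc 0).map (fun p => p.2 + PySem.List.pyGetD row p.1 0))
    sums0                                                                          -- for row in graph: sums = [s + row[i] ...]
  ((PySem.List.enumerate sums 0).reverse.foldl                                     -- for i, s in reversed(list(enumerate(sums)))
    (fun (st : Option Int × Int) p =>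
      match st.1 with
      | none => (some p.2, p.1)
      | some v => if p.2 < v then (some p.2, p.1) else st)
    (none, -1)).2

-- ===== PRECONDITION & SPEC =====
-- Pre_ excludes exactly the inputs where Python A raises IndexError: the empty graph,
-- and graphs where some row is shorter than row 0 (A indexes every row at 0..len(graph[0])-1).
def Pre_get_shortest_vertical_path (graph : List (List Int)) : Prop :=
  graph ≠ [] ∧ ∀ row ∈ graph, (graph.headD []).length ≤ row.length
instance (graph : List (List Int)) : Decidable (Pre_get_shortest_vertical_path graph) := by
  unfold Pre_get_shortest_vertical_path; infer_instance
def pvWitness_get_shortest_vertical_path : List (List Int) := [[3, 1, 2], [0, 4, 1]]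

def Spec_get_shortest_vertical_path (graph : List (List Int)) (out : Int) : Prop := out = get_shortest_vertical_path_alt graph
instance (graph : List (List Int)) (out : Int) : Decidable (Spec_get_shortest_vertical_path graph out) := by unfold Spec_get_shortest_vertical_path; infer_instance

-- ===== CLAIM (what is proved, stated in full; the proofs are below) =====
def Claim_equal_get_shortest_vertical_path : Prop := ∀ (graph : List (List Int)), Dom_get_shortest_vertical_path graph → Pre_get_shortest_vertical_path graph → Spec_get_shortest_vertical_path graph (get_shortest_vertical_path graph)

-- ===== LEMMAS AND PROOFS =====

-- Shared description of both results: m = the minimum column sum, k = its index in the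
-- REVERSED list of sums (so the original position w-1-k is the RIGHTMOST argmin).

-- A-side invariant (by induction on the width): A's fused fold ends at (m, w-1-k).
theorem pv_main (c : Int → Int) (w : Nat) (hw : 0 < w) :
    ∃ (m : Int) (k : Nat),
      PySem.List.min? ((PySem.List.pyRange 0 (w : Int) 1).map c) (fun x => x) = some m ∧
      PySem.List.index? ((PySem.List.pyRange 0 (w : Int) 1).map c).reverse m = some k ∧
      k < w ∧
      (PySem.List.pyRange 0 (w : Int) 1).foldl
        (fun (st : Int × Int) i => if st.2 < 0 ∨ c i ≤ st.1 then (c i, i) else st)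
        (-1, -1) = (m, (w : Int) - 1 - (k : Int)) := by
  induction w, hw using Nat.le_induction with
  | base =>
    have hr : PySem.List.pyRange 0 (1 : Int) 1 = [0] := by decide
    refine ⟨c 0, 0, ?_, ?_, by omega, ?_⟩ <;>
      simp [Nat.cast_one, hr, PySem.List.min?, PySem.List.index?]
  | succ w hw ih =>
    obtain ⟨m, k, h1, h2, hk, h3⟩ := ih
    have hsplit : PySem.List.pyRange 0 ((w + 1 : Nat) : Int) 1
        = PySem.List.pyRange 0 (w : Int) 1 ++ [(w : Int)] := by
      push_cast
      exact PySem.List.pyRange_one_succ_right (by positivity)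
    have hcons : PySem.List.pyRange 0 (w : Int) 1 = 0 :: PySem.List.pyRange 1 (w : Int) 1 :=
      PySem.List.pyRange_one_cons (by exact_mod_cast hw)
    set tail := (PySem.List.pyRange 1 (w : Int) 1).map c with htail
    have hprev : (PySem.List.pyRange 0 (w : Int) 1).map c = c 0 :: tail := by
      rw [hcons]; simp [htail]
    have hm : tail.foldl min (c 0) = m := by
      rw [hprev, PySem.List.min?_id_cons] at h1
      exact Option.some.inj h1
    by_cases hle : c (w : Int) ≤ m
    · refine ⟨c (w : Int), 0, ?_, ?_, by omega, ?_⟩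
      · rw [hsplit, List.map_append, hprev]
        simp only [List.map_cons, List.map_nil, List.cons_append]
        rw [PySem.List.min?_id_cons, List.foldl_append, hm]
        simp [min_eq_right hle]
      · rw [hsplit, List.map_append, List.reverse_append]
        simp only [List.map_cons, List.map_nil, List.reverse_singleton, List.singleton_append]
        exact PySem.List.index?_cons_self _ _
      · rw [hsplit, List.foldl_append, h3]
        have hnotneg : ¬ ((w : Int) - 1 - (k : Int) < 0) := by omega
        simp only [List.foldl_cons, List.foldl_nil]
        rw [if_pos (Or.inr hle)]
        push_cast; ring_nf
    · rw [not_le] at hle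
      refine ⟨m, k + 1, ?_, ?_, by omega, ?_⟩
      · rw [hsplit, List.map_append, hprev]
        simp only [List.map_cons, List.map_nil, List.cons_append]
        rw [PySem.List.min?_id_cons, List.foldl_append, hm]
        simp [min_eq_left (le_of_lt hle)]
      · rw [hsplit, List.map_append, List.reverse_append]
        simp only [List.map_cons, List.map_nil, List.reverse_singleton, List.singleton_append]
        rw [PySem.List.index?_cons_of_ne _ (show c (w : Int) ≠ m by omega), h2]
        rfl
      · rw [hsplit, List.foldl_append, h3]
        simp only [List.foldl_cons, List.foldl_nil]
        rw [if_neg (by simp only [not_or, not_lt, not_le]; exact ⟨by omega, by omega⟩)]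
        congr 1
        push_cast; ring

-- B's backward-scan step
def pvStepB (st : Option Int × Int) (p : Int × Int) : Option Int × Int :=
  match st.1 with
  | none => (some p.2, p.1)
  | some v => if p.2 < v then (some p.2, p.1) else st

theorem pv_le_foldl_min (t : List Int) (x : Int) : ∀ s0 : Int, x ≤ s0 → (∀ v ∈ t, x ≤ v) →
    x ≤ t.foldl min s0 := by
  induction t with
  | nil => intro s0 h _; simpa using h
  | cons a t ih =>
    intro s0 h hall
    simp only [List.foldl_cons]
    exact ih (min s0 a) (le_min h (hall a (List.mem_cons_self))) (fun v hv => hall v (List.mem_cons_of_mem _ hv))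

-- the min and its reversed index survive appending a strictly larger value
theorem pv_lift_min_index (S : List Int) (x m : Int) (k : Nat)
    (h1 : PySem.List.min? S (fun y => y) = some m)
    (h2 : PySem.List.index? S.reverse m = some k) (hmx : m < x) :
    PySem.List.min? (S ++ [x]) (fun y => y) = some m ∧
    PySem.List.index? (S ++ [x]).reverse m = some (k + 1) := by
  cases S with
  | nil => simp [PySem.List.min?] at h1
  | cons s0 t =>
    constructor
    · rw [PySem.List.min?_id_cons] at h1
      rw [List.cons_append, PySem.List.min?_id_cons, List.foldl_append,
        Option.some.inj h1]
      simp [min_eq_left (le_of_lt hmx)]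
    · rw [List.reverse_append, List.reverse_singleton, List.singleton_append,
        PySem.List.index?_cons_of_ne _ (show x ≠ m by omega), h2]
      rfl

-- appending a value ≤ everything makes it the min, at reversed index 0
theorem pv_new_min_index (S : List Int) (x : Int) (h : ∀ v ∈ S, x ≤ v) :
    PySem.List.min? (S ++ [x]) (fun y => y) = some x ∧
    PySem.List.index? (S ++ [x]).reverse x = some 0 := by
  constructor
  · cases S with
    | nil => simp [PySem.List.min?]
    | cons s0 t =>
      rw [List.cons_append, PySem.List.min?_id_cons, List.foldl_append]
      have hx : x ≤ t.foldl min s0 :=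
        pv_le_foldl_min t x s0 (h s0 (List.mem_cons_self)) (fun v hv => h v (List.mem_cons_of_mem _ hv))
      simp [min_eq_right hx]
  · rw [List.reverse_append, List.reverse_singleton, List.singleton_append]
    exact PySem.List.index?_cons_self _ _

-- reversed enumeration of an appended element
theorem pv_enum_rev (S' : List Int) (x : Int) :
    (PySem.List.enumerate (S' ++ [x]) 0).reverse
      = ((S'.length : Int), x) :: (PySem.List.enumerate S' 0).reverse := by
  rw [PySem.List.enumerate_append]
  simp [PySem.List.enumerate_cons, PySem.List.enumerate_nil]

-- backward scan with a running best no value beats: state unchanged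
theorem pv_back_ge (S : List Int) : ∀ (b pos : Int), (∀ v ∈ S, b ≤ v) →
    (PySem.List.enumerate S 0).reverse.foldl pvStepB (some b, pos) = (some b, pos) := by
  induction S using List.reverseRecOn with
  | nil => intro b pos _; simp [PySem.List.enumerate_nil]
  | append_singleton S' x ih =>
    intro b pos h
    rw [pv_enum_rev, List.foldl_cons]
    have hx : ¬ x < b := not_lt.2 (h x (List.mem_append_right _ (List.mem_singleton.2 rfl)))
    simp only [pvStepB, if_neg hx]
    exact ih b pos (fun v hv => h v (List.mem_append_left _ hv))

-- backward scan when some value beats the running best: lands on the rightmost argmin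
theorem pv_back_lt (S : List Int) : ∀ (b pos : Int), (∃ v ∈ S, v < b) →
    ∃ (m : Int) (k : Nat),
      PySem.List.min? S (fun y => y) = some m ∧
      PySem.List.index? S.reverse m = some k ∧
      (PySem.List.enumerate S 0).reverse.foldl pvStepB (some b, pos)
        = (some m, (S.length : Int) - 1 - (k : Int)) := by
  induction S using List.reverseRecOn with
  | nil => intro b pos h; simp at h
  | append_singleton S' x ih =>
    intro b pos h
    rw [pv_enum_rev, List.foldl_cons]
    by_cases hxb : x < b
    · simp only [pvStepB, if_pos hxb]
      by_cases h' : ∃ v ∈ S', v < x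
      · obtain ⟨m, k, h1, h2, h3⟩ := ih x (S'.length : Int) h'
        obtain ⟨v, hv, hvx⟩ := h'
        have hm : m ≤ v := PySem.List.min?_isMin h1 v hv
        obtain ⟨g1, g2⟩ := pv_lift_min_index S' x m k h1 h2 (by omega)
        refine ⟨m, k + 1, g1, g2, ?_⟩
        rw [h3]; congr 1; simp; ring
      · push Not at h'
        obtain ⟨g1, g2⟩ := pv_new_min_index S' x h'
        refine ⟨x, 0, g1, g2, ?_⟩
        rw [pv_back_ge S' x (S'.length : Int) h']
        congr 1; simp
    · simp only [pvStepB, if_neg hxb]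
      have h'' : ∃ v ∈ S', v < b := by
        obtain ⟨v, hv, hvb⟩ := h
        rcases List.mem_append.1 hv with hv' | hv'
        · exact ⟨v, hv', hvb⟩
        · rw [List.mem_singleton] at hv'; omega
      obtain ⟨m, k, h1, h2, h3⟩ := ih b pos h''
      obtain ⟨v, hv, hvb⟩ := h''
      have hm : m ≤ v := PySem.List.min?_isMin h1 v hv
      obtain ⟨g1, g2⟩ := pv_lift_min_index S' x m k h1 h2 (by omega)
      refine ⟨m, k + 1, g1, g2, ?_⟩
      rw [h3]; congr 1; simp; ring

-- B's full backward scan on a nonempty list of sums: (min, rightmost argmin)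
theorem pv_back (S : List Int) (hne : S ≠ []) :
    ∃ (m : Int) (k : Nat),
      PySem.List.min? S (fun y => y) = some m ∧
      PySem.List.index? S.reverse m = some k ∧
      (PySem.List.enumerate S 0).reverse.foldl pvStepB (none, -1)
        = (some m, (S.length : Int) - 1 - (k : Int)) := by
  induction S using List.reverseRecOn with
  | nil => exact absurd rfl hne
  | append_singleton S' x _ =>
    rw [pv_enum_rev, List.foldl_cons]
    simp only [pvStepB]
    by_cases h' : ∃ v ∈ S', v < x
    · obtain ⟨m, k, h1, h2, h3⟩ := pv_back_lt S' x (S'.length : Int) h'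
      obtain ⟨v, hv, hvx⟩ := h'
      have hm : m ≤ v := PySem.List.min?_isMin h1 v hv
      obtain ⟨g1, g2⟩ := pv_lift_min_index S' x m k h1 h2 (by omega)
      refine ⟨m, k + 1, g1, g2, ?_⟩
      rw [h3]; congr 1; simp; ring
    · push Not at h'
      obtain ⟨g1, g2⟩ := pv_new_min_index S' x h'
      refine ⟨x, 0, g1, g2, ?_⟩
      rw [pv_back_ge S' x (S'.length : Int) h']
      congr 1; simp

-- row-major accumulation of the column-sum vector equals the per-column sums
theorem pv_sums (rows : List (List Int)) : ∀ (w : Nat) (f : Int → Int),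
    rows.foldl
      (fun acc row => (PySem.List.enumerate acc 0).map (fun p => p.2 + PySem.List.pyGetD row p.1 0))
      ((PySem.List.pyRange 0 (w : Int) 1).map f)
    = (PySem.List.pyRange 0 (w : Int) 1).map
        (fun i => f i + rows.foldl (fun a row => a + PySem.List.pyGetD row i 0) 0) := by
  induction rows with
  | nil =>
    intro w f
    simp only [List.foldl_nil]
    refine List.map_congr_left ?_
    intro i _
    ring
  | cons r t ih =>
    intro w f
    simp only [List.foldl_cons]
    have hstep : (PySem.List.enumerate ((PySem.List.pyRange 0 (w : Int) 1).map f) 0).map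
        (fun p => p.2 + PySem.List.pyGetD r p.1 0)
        = (PySem.List.pyRange 0 (w : Int) 1).map (fun i => f i + PySem.List.pyGetD r i 0) := by
      rw [PySem.List.enumerate_eq_map_pyRange _ 0, List.map_map]
      have hl : PySem.List.len ((PySem.List.pyRange 0 (w : Int) 1).map f) = (w : Int) := by
        simp [PySem.List.length_pyRange_one]
      rw [hl]
      refine List.map_congr_left ?_
      intro i hi
      obtain ⟨h0, hw⟩ := (PySem.List.mem_pyRange_one).1 hi
      simp only [Function.comp]
      rw [PySem.List.pyGetD_map_pyRange_of_nonneg f (w : Int) i 0 h0 hw]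
    rw [hstep, ih w (fun i => f i + PySem.List.pyGetD r i 0)]
    refine List.map_congr_left ?_
    intro i _
    simp only [PySem.List.foldl_add]
    ring

-- ===== VERDICT (by name: the statement is the Claim_ definition above) =====
theorem get_shortest_vertical_path_spec : Claim_equal_get_shortest_vertical_path := by
  intro graph _ hpre
  unfold Spec_get_shortest_vertical_path
  obtain ⟨hne, _⟩ := hpre
  obtain ⟨r, t, rfl⟩ : ∃ r t, graph = r :: t := by
    cases graph with
    | nil => exact absurd rfl hne
    | cons r t => exact ⟨r, t, rfl⟩
  unfold get_shortest_vertical_path get_shortest_vertical_path_alt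
  simp only [PySem.List.pyGetD_zero_cons]
  -- the inner index loop of A sums the rows directly (B's per-row fold)
  have hinner : ∀ i : Int,
      (PySem.List.pyRange 0 ((r :: t).length : Int) 1).foldl
        (fun s j => s + PySem.List.pyGetD (PySem.List.pyGetD (r :: t) j []) i 0) 0
      = (r :: t).foldl (fun s row => s + PySem.List.pyGetD row i 0) 0 := by
    intro i
    exact PySem.List.foldl_pyRange_zero_pyGetD' (r :: t) []
      (fun s row => s + PySem.List.pyGetD row i 0) 0
  simp only [hinner]
  set c : Int → Int := fun i => (r :: t).foldl (fun s row => s + PySem.List.pyGetD row i 0) 0 with hc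
  -- B's accumulated vector is the list of column sums
  have hrepl : (List.replicate r.length (0 : Int))
      = (PySem.List.pyRange 0 (r.length : Int) 1).map (fun _ => (0 : Int)) := by
    simp [List.map_const', PySem.List.length_pyRange_one]
  have hsums : (r :: t).foldl
      (fun acc row => (PySem.List.enumerate acc 0).map (fun p => p.2 + PySem.List.pyGetD row p.1 0))
      (List.replicate r.length 0)
      = (PySem.List.pyRange 0 (r.length : Int) 1).map c := by
    rw [hrepl, pv_sums (r :: t) r.length (fun _ => 0)]
    exact List.map_congr_left (fun i _ => by simp [hc])
  rw [hsums]
  rcases Nat.eq_zero_or_pos r.length with h0 | hpos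
  · simp [h0, PySem.List.pyRange_one_eq_nil, PySem.List.enumerate_nil]
  · obtain ⟨m, k, h1, h2, hk, h3⟩ := pv_main c r.length hpos
    obtain ⟨m', k', g1, g2, g3⟩ := pv_back ((PySem.List.pyRange 0 (r.length : Int) 1).map c)
      (by rw [PySem.List.pyRange_one_cons (show (0 : Int) < (r.length : Int) by exact_mod_cast hpos)]; simp)
    have hmm : m' = m := by rw [h1] at g1; exact (Option.some.inj g1).symm
    have hkk : k' = k := by rw [hmm, h2] at g2; exact (Option.some.inj g2).symm
    have h3' : (List.foldl (fun (st : Int × Int) i =>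
        if st.2 < 0 ∨ (r :: t).foldl (fun s row => s + PySem.List.pyGetD row i 0) 0 ≤ st.1
        then ((r :: t).foldl (fun s row => s + PySem.List.pyGetD row i 0) 0, i) else st)
        (-1, -1) (PySem.List.pyRange 0 (r.length : Int) 1)) = (m, (r.length : Int) - 1 - (k : Int)) := h3
    have g3' : (List.foldl pvStepB (none, -1)
        (PySem.List.enumerate ((PySem.List.pyRange 0 (r.length : Int) 1).map c) 0).reverse)
        = (some m', (((PySem.List.pyRange 0 (r.length : Int) 1).map c).length : Int) - 1 - (k' : Int)) := g3
    rw [h3']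
    show ((r.length : Int) - 1 - (k : Int)) = (List.foldl _ (none, -1) _).2
    have : (List.foldl (fun (st : Option Int × Int) (p : Int × Int) =>
        match st.1 with
        | none => (some p.2, p.1)
        | some v => if p.2 < v then (some p.2, p.1) else st) (none, -1)
        (PySem.List.enumerate ((PySem.List.pyRange 0 (r.length : Int) 1).map c) 0).reverse)
        = (List.foldl pvStepB (none, -1)
        (PySem.List.enumerate ((PySem.List.pyRange 0 (r.length : Int) 1).map c) 0).reverse) := rfl
    rw [this, g3']
    simp [hkk, PySem.List.length_pyRange_one]
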